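-- pv_equiv track=rewrite | github.com/chtenb/fate | fate/selecting/misc.py | get_line_position
-- ===== SOURCE A (Python) =====
-- def get_line_position(text, linenumber):
--     """
--     :linenumber: count from zero
--     :return: position right after last new line character of the line before linenumber
--     """
--     currentline = 0
--     pos_after_last_newline = 0
--     while currentline < linenumber:
--         try:
--             pos_after_last_newline = text.index('\n', pos_after_last_newline) + 1
--             currentline += 1
--         except ValueError:
--             break
--     return pos_after_last_newline
-- ===== SOURCE B (Python) =====
-- def get_line_position(text, linenumber):
--     parts = text.split('\n')
--     effective = min(linenumber, len(parts) - 1)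
--     pos = 0
--     for i in range(effective):
--         pos += len(parts[i]) + 1
--     return pos
-- ===== Notes on version B (the rewrite author's own statement) =====
-- stated objective: alternative
-- what changed: Replaces the repeated str.index search with try/except inside a while loop by a single split('\n') followed by summing the lengths (+1) of the first min(linenumber, newline-count) segments.
import Mathlib
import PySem

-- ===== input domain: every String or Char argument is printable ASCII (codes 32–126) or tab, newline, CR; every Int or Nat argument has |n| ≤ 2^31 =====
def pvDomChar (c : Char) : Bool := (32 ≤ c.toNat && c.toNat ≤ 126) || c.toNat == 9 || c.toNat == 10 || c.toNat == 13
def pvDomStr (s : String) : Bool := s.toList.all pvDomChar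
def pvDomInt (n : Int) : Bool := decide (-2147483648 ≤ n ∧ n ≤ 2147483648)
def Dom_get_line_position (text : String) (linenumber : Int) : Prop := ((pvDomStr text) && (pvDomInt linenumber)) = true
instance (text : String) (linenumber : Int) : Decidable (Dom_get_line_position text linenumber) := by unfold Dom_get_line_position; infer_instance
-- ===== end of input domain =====

-- B replaces A's repeated str.index scan with split('\n') followed by summing segment lengths; return values agree everywhere.
-- ===== PORT A =====
-- while currentline < linenumber: pos = text.index('\n', pos) + 1, break on ValueError (findFrom = -1)
def aLoop (s : List Char) : Nat -> Int -> Int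
  | 0, pos => pos
  | fuel+1, pos =>
    let r := PySem.Chars.findFrom s ['\n'] pos
    if r = -1 then pos else aLoop s fuel (r + 1)

def get_line_position (text : String) (linenumber : Int) : Int :=
  aLoop text.toList linenumber.toNat 0

-- ===== PORT B =====
def get_line_position_alt (text : String) (linenumber : Int) : Int :=
  let parts := PySem.Chars.splitOn text.toList ['\n']
  let effective := min linenumber ((parts.length : Int) - 1)
  (PySem.List.pyRange 0 effective).foldl
    (fun pos i => pos + ((PySem.List.pyGetD parts i []).length : Int) + 1) 0

-- ===== PRECONDITION & SPEC =====
def Spec_get_line_position (text : String) (linenumber : Int) (out : Int) : Prop := out = get_line_position_alt text linenumber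
instance (text : String) (linenumber : Int) (out : Int) : Decidable (Spec_get_line_position text linenumber out) := by unfold Spec_get_line_position; infer_instance

-- ===== CLAIM (what is proved, stated in full; the proofs are below) =====
def Claim_equal_get_line_position : Prop := ∀ (text : String) (linenumber : Int), Dom_get_line_position text linenumber → Spec_get_line_position text linenumber (get_line_position text linenumber)

-- ===== LEMMAS AND PROOFS =====
theorem go_zero (sep l cur acc) : PySem.Chars.splitOn.go sep 0 l cur acc = ((cur.reverse ++ l) :: acc).reverse := by
  rw [PySem.Chars.splitOn.go]; try omega

theorem go_nil (sep fuel cur acc) : PySem.Chars.splitOn.go sep (fuel+1) [] cur acc = (cur.reverse :: acc).reverse := by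
  rw [PySem.Chars.splitOn.go]; try omega

theorem go_cons (sep fuel c rest cur acc) : PySem.Chars.splitOn.go sep (fuel+1) (c :: rest) cur acc =
    if sep.isPrefixOf (c :: rest) then PySem.Chars.splitOn.go sep fuel (List.drop sep.length (c :: rest)) [] (cur.reverse :: acc)
    else PySem.Chars.splitOn.go sep fuel rest (c :: cur) acc := by
  rw [PySem.Chars.splitOn.go]; try omega

theorem go_acc (sep : List Char) (fuel : Nat) : ∀ (l cur : List Char) (acc : List (List Char)),
    PySem.Chars.splitOn.go sep fuel l cur acc = acc.reverse ++ PySem.Chars.splitOn.go sep fuel l cur [] := by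
  induction fuel with
  | zero => intro l cur acc; simp [go_zero]
  | succ n ih =>
    intro l cur acc
    cases l with
    | nil => simp [go_nil]
    | cons c rest =>
      rw [go_cons, go_cons]
      split
      · rw [ih _ _ (cur.reverse :: acc), ih _ _ [cur.reverse]]; simp
      · exact ih _ _ _

theorem go_no_nl : ∀ (l : List Char) (fuel : Nat) (cur : List Char) (acc : List (List Char)),
    '\n' ∉ l → l.length ≤ fuel →
    PySem.Chars.splitOn.go ['\n'] fuel l cur acc = ((cur.reverse ++ l) :: acc).reverse := by
  intro l
  induction l with
  | nil => intro fuel cur acc _ _; cases fuel <;> simp [go_zero, go_nil]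
  | cons c rest ih =>
    intro fuel cur acc hnl hlen
    cases fuel with
    | zero => simp at hlen
    | succ n =>
      rw [go_cons]
      have hc : c ≠ '\n' := fun h => hnl (by simp [h])
      rw [if_neg (by simp [List.isPrefixOf]; exact fun h => absurd h.symm hc)]
      rw [ih n (c :: cur) acc (fun h => hnl (List.mem_cons_of_mem _ h)) (by simp at hlen; omega)]
      simp

theorem go_consume : ∀ (p : List Char) (fuel : Nat) (t cur : List Char) (acc : List (List Char)),
    '\n' ∉ p →
    PySem.Chars.splitOn.go ['\n'] (p.length + 1 + fuel) (p ++ '\n' :: t) cur acc =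
      PySem.Chars.splitOn.go ['\n'] fuel t [] ((cur.reverse ++ p) :: acc) := by
  intro p
  induction p with
  | nil =>
    intro fuel t cur acc _
    have : 0 + 1 + fuel = fuel + 1 := by omega
    simp only [List.length_nil, this, List.nil_append]
    rw [go_cons, if_pos (by simp [List.isPrefixOf])]
    simp
  | cons c p' ih =>
    intro fuel t cur acc hnl
    have hc : c ≠ '\n' := fun h => hnl (by simp [h])
    have : (c :: p').length + 1 + fuel = (p'.length + 1 + fuel) + 1 := by simp; omega
    rw [this, List.cons_append, go_cons]
    rw [if_neg (by simp [List.isPrefixOf]; exact fun h => absurd h.symm hc)]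
    rw [ih fuel t (c :: cur) acc (fun h => hnl (List.mem_cons_of_mem _ h))]
    simp

theorem splitOn_no_nl (s : List Char) (h : '\n' ∉ s) : PySem.Chars.splitOn s ['\n'] = [s] := by
  rw [PySem.Chars.splitOn, go_no_nl s (s.length+1) [] [] h (Nat.le_succ _)]
  simp

theorem splitOn_cons (p t : List Char) (h : '\n' ∉ p) :
    PySem.Chars.splitOn (p ++ '\n' :: t) ['\n'] = p :: PySem.Chars.splitOn t ['\n'] := by
  rw [PySem.Chars.splitOn]
  have : (p ++ '\n' :: t).length + 1 = p.length + 1 + (t.length + 1) := by simp; omega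
  rw [this, go_consume p (t.length+1) t [] [] h, go_acc]
  simp [PySem.Chars.splitOn]

theorem singleton_prefix_iff (c : Char) (l : List Char) : [c] <+: l ↔ ∃ t, l = c :: t := by
  cases l with
  | nil => simp
  | cons a t =>
    constructor
    · rintro ⟨u, hu⟩
      simp at hu
      exact ⟨t, by simp [hu.1]⟩
    · rintro ⟨t', ht⟩
      rw [ht]
      exact ⟨t', rfl⟩

theorem find_first (p t : List Char) (h : '\n' ∉ p) :
    PySem.Chars.find (p ++ '\n' :: t) ['\n'] = (p.length : Int) := by
  have hmem : '\n' ∈ p ++ '\n' :: t := by simp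
  have hnn : 0 ≤ PySem.Chars.find (p ++ '\n' :: t) ['\n'] :=
    (PySem.Chars.find_nonneg_iff _ _).mpr ((List.singleton_infix_iff _ _).mpr hmem)
  obtain ⟨hpre, hmin⟩ := PySem.Chars.find_spec hnn
  set f := (PySem.Chars.find (p ++ '\n' :: t) ['\n']).toNat with hf
  have hle : f ≤ p.length := by
    by_contra hgt
    exact hmin p.length (by omega) (by rw [List.drop_append_of_le_length (le_refl _), List.drop_length]; simp)
  have hge : ¬ f < p.length := by
    intro hlt
    obtain ⟨u, hu⟩ := (singleton_prefix_iff _ _).mp hpre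
    rw [List.drop_append_of_le_length (le_of_lt hlt)] at hu
    have : p.drop f ≠ [] := by simp; omega
    cases hd : p.drop f with
    | nil => exact this hd
    | cons a b =>
      rw [hd] at hu
      simp at hu
      exact absurd (by rw [← hu.1]; exact List.mem_of_mem_drop (by rw [hd]; simp) : '\n' ∈ p) h
  have : f = p.length := by omega
  omega

theorem find_toNat_lt (l : List Char) (h : PySem.Chars.find l ['\n'] ≠ -1) :
    (PySem.Chars.find l ['\n']).toNat < l.length ∧ PySem.Chars.find l ['\n'] = ((PySem.Chars.find l ['\n']).toNat : Int) := by
  have hnn : 0 ≤ PySem.Chars.find l ['\n'] := by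
    have := PySem.Chars.neg_one_le_find l ['\n']
    omega
  obtain ⟨hpre, -⟩ := PySem.Chars.find_spec hnn
  obtain ⟨u, hu⟩ := (singleton_prefix_iff _ _).mp hpre
  constructor
  · by_contra hge
    rw [List.drop_eq_nil_of_le (by omega)] at hu
    simp at hu
  · omega

theorem aLoop_shift (fuel : Nat) : ∀ (s : List Char) (k : Nat), k ≤ s.length →
    aLoop s fuel (k : Int) = k + aLoop (s.drop k) fuel 0 := by
  induction fuel with
  | zero => intro s k _; simp [aLoop]
  | succ n ih =>
    intro s k hk
    simp only [aLoop]
    rw [PySem.Chars.findFrom_natCast s ['\n'] k hk, PySem.Chars.findFrom_zero]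
    by_cases hfind : PySem.Chars.find (s.drop k) ['\n'] = -1
    · rw [if_pos (by rw [hfind]; rfl), if_pos hfind]
      simp
    · obtain ⟨hlt, heq⟩ := find_toNat_lt (s.drop k) hfind
      set f := (PySem.Chars.find (s.drop k) ['\n']).toNat with hfdef
      rw [if_neg (by rw [heq]; intro hcon; omega), if_neg hfind]
      have h1 : (k : Int) + PySem.Chars.find (s.drop k) ['\n'] + 1 = ((k + f + 1 : Nat) : Int) := by
        rw [heq]; push_cast; ring
      have h2 : PySem.Chars.find (s.drop k) ['\n'] + 1 = ((f + 1 : Nat) : Int) := by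
        rw [heq]; push_cast; ring
      rw [h1, h2, ih s (k + f + 1) (by simp at hlt; omega), ih (s.drop k) (f + 1) (by omega)]
      rw [if_neg hfind, List.drop_drop, show k + (f + 1) = k + f + 1 from by omega]
      push_cast
      ring

theorem decomp (s : List Char) : '\n' ∉ s ∨ ∃ p t, s = p ++ '\n' :: t ∧ '\n' ∉ p := by
  induction s with
  | nil => left; simp
  | cons c s' ih =>
    by_cases hc : c = '\n'
    · right; exact ⟨[], s', by simp [hc], by simp⟩
    · rcases ih with h | ⟨p, t, rfl, hp⟩
      · left; simp [h]; exact fun hcon => absurd hcon.symm hc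
      · right; exact ⟨c :: p, t, by simp, by simp [hp]; exact fun hcon => absurd hcon.symm hc⟩

def bsum (parts : List (List Char)) (k : Nat) : Int :=
  ((parts.take k).map (fun p => (p.length : Int) + 1)).sum

theorem splitOn_length_pos (t : List Char) : 0 < (PySem.Chars.splitOn t ['\n']).length := by
  rcases decomp t with h | ⟨p, u, rfl, hp⟩
  · rw [splitOn_no_nl t h]; simp
  · rw [splitOn_cons p u hp]; simp

theorem mainL2 : ∀ (n : Nat) (s : List Char), s.length ≤ n → ∀ fuel : Nat,
    aLoop s fuel 0 = bsum (PySem.Chars.splitOn s ['\n'])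
      (min fuel ((PySem.Chars.splitOn s ['\n']).length - 1)) := by
  intro n
  induction n with
  | zero =>
    intro s hs fuel
    have : s = [] := List.eq_nil_of_length_eq_zero (by omega)
    subst this
    rw [splitOn_no_nl [] (by simp)]
    cases fuel with
    | zero => simp [aLoop, bsum]
    | succ m =>
      simp only [aLoop, PySem.Chars.findFrom_zero]
      rw [if_pos (by rw [(PySem.Chars.find_eq_neg_one_iff _ _).mpr (by simp)])]
      simp [bsum]
  | succ n ih =>
    intro s hs fuel
    rcases decomp s with h | ⟨p, t, rfl, hp⟩
    · rw [splitOn_no_nl s h]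
      cases fuel with
      | zero => simp [aLoop, bsum]
      | succ m =>
        simp only [aLoop, PySem.Chars.findFrom_zero]
        rw [if_pos (by rw [(PySem.Chars.find_eq_neg_one_iff _ _).mpr (by rw [List.singleton_infix_iff]; exact h)])]
        simp [bsum]
    · rw [splitOn_cons p t hp]
      set L := (PySem.Chars.splitOn t ['\n']).length with hL
      have hL1 : 0 < L := splitOn_length_pos t
      cases fuel with
      | zero => simp [aLoop, bsum]
      | succ m =>
        simp only [aLoop, PySem.Chars.findFrom_zero]
        rw [find_first p t hp, if_neg (by intro hcon; omega)]
        have hcast : (p.length : Int) + 1 = ((p.length + 1 : Nat) : Int) := by push_cast; ring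
        rw [hcast, aLoop_shift m _ (p.length + 1) (by simp)]
        have hdrop : List.drop (p.length + 1) (p ++ '\n' :: t) = t := by
          rw [show p ++ '\n' :: t = (p ++ ['\n']) ++ t by simp, List.drop_left' (by simp)]
        rw [hdrop, ih t (by simp at hs; omega) m]
        have hmin2 : min (m + 1) ((PySem.Chars.splitOn t ['\n']).length + 1 - 1) = (min m (L - 1)) + 1 := by omega
        simp only [bsum, List.length_cons, hmin2, List.take_succ_cons, List.map_cons, List.sum_cons]
        push_cast
        ring

theorem sum_loop (parts : List (List Char)) : ∀ (e : Nat), e ≤ parts.length →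
    (PySem.List.pyRange 0 (e : Int)).foldl
      (fun pos i => pos + ((PySem.List.pyGetD parts i []).length : Int) + 1) 0 = bsum parts e := by
  intro e
  induction e with
  | zero => intro _; simp [bsum, PySem.List.pyRange]
  | succ k ih =>
    intro he
    rw [show ((k+1 : Nat) : Int) = (k : Int) + 1 by push_cast; ring]
    rw [PySem.List.pyRange_one_append 0 (k : Int) ((k : Int)+1) (by omega) (by omega)]
    rw [List.foldl_append, ih (by omega)]
    have hsing : PySem.List.pyRange (k : Int) ((k : Int)+1) = [(k : Int)] := by
      rw [PySem.List.pyRange_one_cons]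
      · simp [PySem.List.pyRange]
      · omega
    rw [hsing]
    simp only [List.foldl_cons, List.foldl_nil]
    rw [PySem.List.pyGetD_of_nonneg parts [] (by omega : (0:Int) ≤ (k:Int))]
    have hk : k < parts.length := by omega
    simp only [bsum, List.map_take]
    rw [List.sum_take_succ _ k (by simp [hk])]
    simp [List.getD, List.getElem?_eq_getElem hk]
    ring

theorem final (text : String) (n : Int) : get_line_position text n = get_line_position_alt text n := by
  simp only [get_line_position, get_line_position_alt]
  have hL := splitOn_length_pos text.toList
  set parts := PySem.Chars.splitOn text.toList ['\n'] with hparts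
  by_cases hn : n ≤ 0
  · have h0 : n.toNat = 0 := by omega
    have heff : PySem.List.pyRange 0 (min n ((parts.length : Int) - 1)) = [] := by
      simp [PySem.List.pyRange]
      omega
    rw [h0, heff]
    simp [aLoop]
  · have heq : min n ((parts.length : Int) - 1) = ((min n.toNat (parts.length - 1) : Nat) : Int) := by
      push_cast
      omega
    rw [heq, sum_loop parts _ (by omega)]
    exact mainL2 text.toList.length text.toList (le_refl _) n.toNat


-- ===== VERDICT (by name: the statement is the Claim_ definition above) =====
theorem get_line_position_spec : Claim_equal_get_line_position := by
  intro text n _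
  unfold Spec_get_line_position
  exact final text n
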